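-- pv_equiv track=rewrite | github.com/jake-white/PCtoSwitch | Tetris/main.py | get_bumpiness
-- ===== SOURCE A (Python) =====
-- def get_bumpiness(temp_board):
--     bumpiness = 0
--     last_height = 0
--     for x in range(0, len(temp_board[0])):
--         height = 0
--         for y in range(0, len(temp_board)):
--             if(temp_board[y][x]):
--                 height = len(temp_board) - y
--                 break
--         if(x > 0):
--             bumpiness += abs(height-last_height)
--         last_height = height
--     return bumpiness
-- ===== SOURCE B (Python) =====
-- def get_bumpiness(temp_board):
--     # Level-sweep: go down the board row by row, maintaining a mask of columns
--     # already reached from the top; at each level the number of adjacent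
--     # mask-boundaries contributes 1 per unit of height difference.
--     w = len(temp_board[0])
--     reached = [False] * w
--     total = 0
--     for row in temp_board:
--         reached = [r or (x < len(row) and bool(row[x]))
--                    for x, r in enumerate(reached)]
--         for x in range(w - 1):
--             if reached[x] != reached[x + 1]:
--                 total += 1
--     return total
-- ===== Notes on version B (the rewrite author's own statement) =====
-- stated objective: alternative
-- what changed: Replaces the per-column first-filled-cell height scan with adjacent height differences by a level-sweep: walk the board top to bottom maintaining a boolean mask of columns already reached, and count adjacent mask boundaries at every level; each unit of height difference contributes exactly one boundary at one level, so the totals coincide.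
import Mathlib
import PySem

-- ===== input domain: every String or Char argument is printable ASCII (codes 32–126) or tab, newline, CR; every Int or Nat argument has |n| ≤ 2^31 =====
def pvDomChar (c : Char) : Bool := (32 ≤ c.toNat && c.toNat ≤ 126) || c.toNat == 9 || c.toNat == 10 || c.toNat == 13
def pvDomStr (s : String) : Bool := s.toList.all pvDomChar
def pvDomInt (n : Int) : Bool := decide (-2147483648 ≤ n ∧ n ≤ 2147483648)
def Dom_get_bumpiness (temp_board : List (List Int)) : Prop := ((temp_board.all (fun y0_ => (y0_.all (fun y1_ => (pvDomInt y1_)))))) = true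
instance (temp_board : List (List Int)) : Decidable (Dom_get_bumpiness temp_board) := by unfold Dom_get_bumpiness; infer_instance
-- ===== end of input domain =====

-- B replaces the per-column height scan by a top-to-bottom level sweep that counts
-- adjacent boundaries of the "already reached" column mask; objective: alternative.

-- ===== PORT A =====
-- inner 'for y in range(n): if temp_board[y][x]: height = n - y; break' (height starts 0);
-- element access is exact inside Pre_ (indices are then always in range, so getD never defaults)
def pvA_inner (rows : List (List Int)) (x : Nat) : List Nat → Int
  | [] => 0
  | y :: ys =>
      if (rows.getD y []).getD x 0 ≠ 0 then (rows.length : Int) - (y : Int)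
      else pvA_inner rows x ys

-- outer 'for x in range(w)' carrying (bumpiness, last_height)
def pvA_outer (rows : List (List Int)) : List Nat → Int × Int → Int
  | [], (b, _) => b
  | x :: xs, (b, last) =>
      let height := pvA_inner rows x (List.range rows.length)
      let b' := if x > 0 then b + |height - last| else b
      pvA_outer rows xs (b', height)

def get_bumpiness (temp_board : List (List Int)) : Int :=
  pvA_outer temp_board (List.range (temp_board.headD []).length) (0, 0)

-- ===== PORT B =====
-- reached = [r or (x < len(row) and bool(row[x])) for x, r in enumerate(reached)]
def pvB_step (row : List Int) (reached : List Bool) : List Bool :=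
  reached.mapIdx (fun x r => r || (decide (x < row.length) && (row.getD x 0 != 0)))

-- for x in range(w-1): if reached[x] != reached[x+1]: total += 1
def pvB_count (w : Nat) (reached : List Bool) : Int :=
  ((List.range (w - 1)).map (fun x =>
    if reached.getD x false != reached.getD (x+1) false then (1:Int) else 0)).sum

def get_bumpiness_alt (temp_board : List (List Int)) : Int :=
  ((temp_board.foldl (fun (st : List Bool × Int) row =>
      let m := pvB_step row st.1
      (m, st.2 + pvB_count (temp_board.headD []).length m))
    (List.replicate (temp_board.headD []).length false, 0))).2

-- ===== PRECONDITION & SPEC =====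
-- Pre_ is exactly the inputs on which Python A returns: the board is nonempty, and for no column x < len(row 0)
-- does the downward scan hit a row shorter than x+1 while all rows above it hold 0 in column x
-- (there A raises IndexError).
def Pre_get_bumpiness (temp_board : List (List Int)) : Prop :=
  temp_board ≠ [] ∧
  ∀ x < (temp_board.headD []).length, ∀ y < temp_board.length,
    ¬ ((temp_board.getD y []).length ≤ x ∧
       ∀ y' < y, x < (temp_board.getD y' []).length ∧ (temp_board.getD y' []).getD x 0 = 0)
instance (temp_board : List (List Int)) : Decidable (Pre_get_bumpiness temp_board) := by
  unfold Pre_get_bumpiness; infer_instance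

def pvWitness_get_bumpiness : List (List Int) := [[0, 1], [1, 1]]

def Spec_get_bumpiness (temp_board : List (List Int)) (out : Int) : Prop := out = get_bumpiness_alt temp_board
instance (temp_board : List (List Int)) (out : Int) : Decidable (Spec_get_bumpiness temp_board out) := by unfold Spec_get_bumpiness; infer_instance

-- ===== CLAIM (what is proved, stated in full; the proofs are below) =====
def Claim_equal_get_bumpiness : Prop := ∀ (temp_board : List (List Int)), Dom_get_bumpiness temp_board → Pre_get_bumpiness temp_board → Spec_get_bumpiness temp_board (get_bumpiness temp_board)

-- ===== LEMMAS AND PROOFS =====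

-- the cell test A and B both use (getD-default 0 = empty)
def pvQ (tb : List (List Int)) (x y : Nat) : Bool := (tb.getD y []).getD x 0 != 0

-- the column height A computes
def pvH (tb : List (List Int)) (x : Nat) : Int := pvA_inner tb x (List.range tb.length)

-- the reached-mask after k rows
def pvMaskF (tb : List (List Int)) (k : Nat) : List Bool :=
  (List.range (tb.headD []).length).map (fun x => (List.range k).any (pvQ tb x))

-- pairwise-|difference| sum, the shape A's accumulator computes
def pvPairSum : List Int → Int
  | [] => 0
  | [_] => 0
  | a :: b :: t => |a - b| + pvPairSum (b :: t)

-- A's inner break-loop equals the find?-based height, for any list of row indices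
theorem pvA_inner_eq_find (rows : List (List Int)) (x : Nat) (ys : List Nat) :
    pvA_inner rows x ys =
      (((ys.find? (fun y => (rows.getD y []).getD x 0 != 0)).map
        (fun (y : Nat) => (rows.length : Int) - (y : Int))).getD 0) := by
  induction ys with
  | nil => simp [pvA_inner]
  | cons y ys ih =>
      by_cases h : (rows.getD y []).getD x 0 = 0
      · rw [List.find?_cons_of_neg (by simp only [h]; decide), ← ih]
        simp only [pvA_inner]
        rw [if_neg (not_not_intro h)]
      · rw [List.find?_cons_of_pos (by simpa using h)]
        simp only [pvA_inner]
        rw [if_pos h]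
        simp

-- A's outer loop, on positive column indices, adds the pairwise sum seeded with last_height
theorem pvA_outer_eq (rows : List (List Int)) (xs : List Nat) (b last : Int)
    (hpos : ∀ x ∈ xs, 0 < x) :
    pvA_outer rows xs (b, last) =
      b + pvPairSum (last :: xs.map (fun x => pvA_inner rows x (List.range rows.length))) := by
  induction xs generalizing b last with
  | nil => simp [pvA_outer, pvPairSum]
  | cons x xs ih =>
      have hx : 0 < x := hpos x (by simp)
      simp only [pvA_outer, if_pos hx, List.map_cons, pvPairSum]
      rw [ih _ _ (fun z hz => hpos z (by simp [hz]))]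
      have : |pvA_inner rows x (List.range rows.length) - last|
           = |last - pvA_inner rows x (List.range rows.length)| := abs_sub_comm _ _
      omega

-- A = pairSum of the height table
theorem pvA_eq_pairSum (tb : List (List Int)) :
    get_bumpiness tb = pvPairSum ((List.range ((tb.headD []).length)).map (pvH tb)) := by
  unfold get_bumpiness pvH
  cases hw : (tb.headD []).length with
  | zero => simp [pvA_outer, pvPairSum]
  | succ k =>
      have hrange : List.range (k + 1) = 0 :: List.range' 1 k := by
        rw [List.range_eq_range']; rfl
      rw [hrange]
      rw [show pvA_outer tb (0 :: List.range' 1 k) (0, 0)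
            = pvA_outer tb (List.range' 1 k) (0, pvA_inner tb 0 (List.range tb.length)) from by
          simp [pvA_outer]]
      rw [pvA_outer_eq tb (List.range' 1 k) 0 _
        (fun z hz => by have := List.mem_range'_1.mp hz; omega)]
      simp

-- pairSum as an indexed sum of adjacent |differences|
theorem pvPairSum_eq_sum (l : List Int) :
    pvPairSum l = ((List.range (l.length - 1)).map
      (fun x => |l.getD x 0 - l.getD (x+1) 0|)).sum := by
  induction l with
  | nil => simp [pvPairSum]
  | cons a t ih =>
      cases t with
      | nil => simp [pvPairSum]
      | cons b t' =>
          rw [pvPairSum]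
          rw [ih]
          simp only [List.length_cons, Nat.add_sub_cancel, List.range_succ_eq_map,
            List.map_cons, List.sum_cons, List.map_map]
          simp [Function.comp_def, List.getElem?_cons_succ]

-- one sweep step: OR-ing row k into the mask after k rows gives the mask after k+1 rows
theorem pvB_step_mask (tb : List (List Int)) (k : Nat) :
    pvB_step (tb.getD k []) (pvMaskF tb k) = pvMaskF tb (k+1) := by
  unfold pvB_step pvMaskF
  apply List.ext_getElem
  · simp
  · intro i h1 h2
    simp only [List.getElem_mapIdx, List.getElem_map, List.getElem_range]
    rw [List.range_succ, List.any_append]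
    simp only [List.any_cons, List.any_nil, Bool.or_false]
    congr 1
    by_cases hi : i < (tb.getD k []).length
    · have hd : decide (i < (tb.getD k []).length) = true := by simpa using hi
      rw [hd, Bool.true_and]; rfl
    · have hd : decide (i < (tb.getD k []).length) = false := by simpa using hi
      have h0 : (tb.getD k []).getD i 0 = 0 := by
        rw [List.getD_eq_getElem?_getD, List.getElem?_eq_none (by omega)]; rfl
      rw [hd, Bool.false_and]
      simp only [pvQ, h0, bne_self_eq_false]

-- the main fold, unrolled against the mask sequence
theorem pvB_fold (tb : List (List Int)) :
    ∀ (rs : List (List Int)) (j : Nat) (t : Int), tb.drop j = rs →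
    ((rs.foldl (fun (st : List Bool × Int) row =>
        let m := pvB_step row st.1
        (m, st.2 + pvB_count (tb.headD []).length m))
      (pvMaskF tb j, t))).2
    = t + ((List.range rs.length).map
        (fun i => pvB_count (tb.headD []).length (pvMaskF tb (j+i+1)))).sum := by
  intro rs
  induction rs with
  | nil => intro j t _; simp
  | cons r rs ih =>
      intro j t hdrop
      have h0 : tb[j]? = some r := by
        have h := List.getElem?_drop (xs := tb) (i := j) (j := 0)
        rw [hdrop] at h
        simpa using h.symm
      have hr : tb.getD j [] = r := by
        simp [List.getD_eq_getElem?_getD, h0]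
      have hdrop' : tb.drop (j+1) = rs := by
        have h := List.tail_drop (l := tb) (i := j)
        rw [hdrop] at h
        simpa using h.symm
      simp only [List.foldl_cons]
      rw [show pvB_step r (pvMaskF tb j) = pvMaskF tb (j+1) from by
            rw [← hr]; exact pvB_step_mask tb j]
      rw [ih (j+1) _ hdrop']
      rw [List.length_cons, List.range_succ_eq_map, List.map_cons, List.sum_cons,
        List.map_map]
      have hmap : ∀ i ∈ List.range rs.length,
          ((fun i => pvB_count (tb.headD []).length (pvMaskF tb (j + i + 1))) ∘ Nat.succ) i
            = (fun i => pvB_count (tb.headD []).length (pvMaskF tb (j + 1 + i + 1))) i := by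
        intro i _
        simp only [Function.comp_def]
        have h : j + (i + 1) + 1 = j + 1 + i + 1 := by omega
        rw [h]
      rw [List.map_congr_left hmap]
      have h0' : j + 0 + 1 = j + 1 := by omega
      rw [h0']
      omega

-- start of the sweep
theorem pvMaskF_zero (tb : List (List Int)) :
    pvMaskF tb 0 = List.replicate (tb.headD []).length false := by
  simp [pvMaskF, List.map_const']

-- B = sum over levels of mask-boundary counts
theorem pvB_eq_levels (tb : List (List Int)) :
    get_bumpiness_alt tb
      = ((List.range tb.length).map
          (fun i => pvB_count (tb.headD []).length (pvMaskF tb (i+1)))).sum := by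
  unfold get_bumpiness_alt
  rw [← pvMaskF_zero]
  rw [pvB_fold tb tb 0 0 (by simp)]
  simp

-- reading the mask entries
theorem pvMaskF_getD (tb : List (List Int)) (k x : Nat) (hx : x < (tb.headD []).length) :
    (pvMaskF tb k).getD x false = (List.range k).any (pvQ tb x) := by
  unfold pvMaskF
  rw [List.getD_eq_getElem?_getD, List.getElem?_map]
  rw [List.getElem?_range hx]
  rfl

-- the boundary count of one mask, entrywise
theorem pvB_count_mask (tb : List (List Int)) (k : Nat) :
    pvB_count ((tb.headD []).length) (pvMaskF tb k)
      = ((List.range ((tb.headD []).length - 1)).map (fun x =>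
          if ((List.range k).any (pvQ tb x)) != ((List.range k).any (pvQ tb (x+1)))
          then (1:Int) else 0)).sum := by
  unfold pvB_count
  congr 1
  apply List.map_congr_left
  intro x hx
  have hx' := List.mem_range.mp hx
  rw [pvMaskF_getD tb k x (by omega), pvMaskF_getD tb k (x+1) (by omega)]

-- find? over an append, split by the head part's result
theorem pv_find_append_some (p : Nat → Bool) (l1 l2 : List Nat) (a : Nat)
    (h : l1.find? p = some a) : (l1 ++ l2).find? p = some a := by
  induction l1 with
  | nil => simp at h
  | cons x l1 ih =>
      by_cases hx : p x
      · rw [List.find?_cons_of_pos hx] at h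
        rw [List.cons_append, List.find?_cons_of_pos hx]
        exact h
      · rw [List.find?_cons_of_neg (by simpa using hx)] at h
        rw [List.cons_append, List.find?_cons_of_neg (by simpa using hx)]
        exact ih h

theorem pv_find_append_none (p : Nat → Bool) (l1 l2 : List Nat)
    (h : l1.find? p = none) : (l1 ++ l2).find? p = l2.find? p := by
  induction l1 with
  | nil => simp
  | cons x l1 ih =>
      by_cases hx : p x
      · rw [List.find?_cons_of_pos hx] at h; simp at h
      · rw [List.find?_cons_of_neg (by simpa using hx)] at h
        rw [List.cons_append, List.find?_cons_of_neg (by simpa using hx)]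
        exact ih h

-- find? on range n returns the least index satisfying p
theorem pv_find_range_min (p : Nat → Bool) :
    ∀ (n y0 : Nat), (List.range n).find? p = some y0 →
      p y0 = true ∧ y0 < n ∧ ∀ y < y0, p y = false := by
  intro n
  induction n with
  | zero => intro y0 h; simp at h
  | succ n ih =>
      intro y0 h
      rw [List.range_succ] at h
      cases hf : (List.range n).find? p with
      | some a =>
          rw [pv_find_append_some p _ _ a hf] at h
          obtain ⟨hp, hlt, hmin⟩ := ih a hf
          cases h
          exact ⟨hp, by omega, hmin⟩
      | none =>
          rw [pv_find_append_none p _ _ hf] at h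
          have hall : ∀ y < n, p y = false := by
            intro y hy
            have := List.find?_eq_none.mp hf y (List.mem_range.mpr hy)
            simpa using this
          by_cases hn : p n
          · rw [List.find?_cons_of_pos hn] at h
            cases h
            exact ⟨hn, by omega, hall⟩
          · rw [List.find?_cons_of_neg (by simpa using hn)] at h
            simp at h

-- bounds on the height
theorem pvH_bounds (tb : List (List Int)) (x : Nat) :
    0 ≤ pvH tb x ∧ pvH tb x ≤ (tb.length : Int) := by
  unfold pvH
  rw [pvA_inner_eq_find]
  cases hf : (List.range tb.length).find? (fun y => (tb.getD y []).getD x 0 != 0) with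
  | none => simp
  | some y0 =>
      obtain ⟨_, hlt, _⟩ := pv_find_range_min _ _ _ hf
      rw [show (Option.map (fun (y : Nat) => ((tb.length : Int) - (y : Int))) (some y0)).getD 0
            = (tb.length : Int) - (y0 : Int) from rfl]
      have hc : (y0 : Int) < (tb.length : Int) := by exact_mod_cast hlt
      constructor <;> omega

-- bridge: the mask bit after k rows is the level test against the height
theorem pv_any_iff (tb : List (List Int)) (x k : Nat) (hk : k ≤ tb.length) :
    (List.range k).any (pvQ tb x) = decide ((tb.length : Int) - k < pvH tb x) := by
  unfold pvH
  rw [pvA_inner_eq_find]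
  cases hf : (List.range tb.length).find? (fun y => (tb.getD y []).getD x 0 != 0) with
  | none =>
      have hall : ∀ y < tb.length, pvQ tb x y = false := by
        intro y hy
        have := List.find?_eq_none.mp hf y (List.mem_range.mpr hy)
        simpa [pvQ] using this
      have h1 : (List.range k).any (pvQ tb x) = false := by
        rw [List.any_eq_false]
        intro y hy
        have hy' := List.mem_range.mp hy
        simp [hall y (by omega)]
      rw [h1, show (Option.map (fun (y : Nat) => ((tb.length : Int) - (y : Int)))
            (none : Option Nat)).getD 0 = 0 from rfl]
      rw [decide_eq_false (by omega)]
  | some y0 =>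
      obtain ⟨hp, hlt, hmin⟩ := pv_find_range_min _ _ _ hf
      rw [show (Option.map (fun (y : Nat) => ((tb.length : Int) - (y : Int))) (some y0)).getD 0
            = (tb.length : Int) - (y0 : Int) from rfl]
      by_cases hy : y0 < k
      · have h1 : (List.range k).any (pvQ tb x) = true := by
          rw [List.any_eq_true]
          exact ⟨y0, List.mem_range.mpr hy, by simpa [pvQ] using hp⟩
        rw [h1, decide_eq_true]
        have : (y0 : Int) < k := by exact_mod_cast hy
        omega
      · have h1 : (List.range k).any (pvQ tb x) = false := by
          rw [List.any_eq_false]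
          intro y hyk
          have hyk' := List.mem_range.mp hyk
          simpa [pvQ] using hmin y (by omega)
        rw [h1, decide_eq_false]
        have : (k : Int) ≤ y0 := by exact_mod_cast (by omega : k ≤ y0)
        omega

-- sum of a pointwise sum splits
theorem pv_sum_map_add (l : List Nat) (f g : Nat → Int) :
    (l.map (fun x => f x + g x)).sum = (l.map f).sum + (l.map g).sum := by
  induction l with
  | nil => simp
  | cons a l ih => simp [ih]; omega

-- exchange of the two finite sums
theorem pv_sum_swap (l1 l2 : List Nat) (g : Nat → Nat → Int) :
    (l1.map (fun a => (l2.map (fun b => g a b)).sum)).sum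
      = (l2.map (fun b => (l1.map (fun a => g a b)).sum)).sum := by
  induction l1 with
  | nil => simp
  | cons a l1 ih =>
      simp only [List.map_cons, List.sum_cons, ih]
      rw [← pv_sum_map_add]

-- summing f over range n equals summing it back-to-front
theorem pv_sum_rev (n : Nat) (f : Nat → Int) :
    ((List.range n).map f).sum = ((List.range n).map (fun i => f (n - 1 - i))).sum := by
  induction n generalizing f with
  | zero => simp
  | succ n ih =>
      conv_lhs => rw [List.range_succ]
      rw [List.map_append, List.sum_append]
      conv_rhs => rw [List.range_succ_eq_map]
      simp only [List.map_cons, List.map_nil, List.sum_cons, List.sum_nil, List.map_map,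
        add_zero]
      have h : ∀ i ∈ List.range n,
          ((fun i => f (n + 1 - 1 - i)) ∘ Nat.succ) i = (fun i => f (n - 1 - i)) i := by
        intro i _
        simp only [Function.comp_def]
        have e : n + 1 - 1 - (i + 1) = n - 1 - i := by omega
        rw [e]
      rw [List.map_congr_left h, ← ih]
      have e0 : n + 1 - 1 - 0 = n := by omega
      rw [e0]
      omega

-- counting levels below a and not b (or vice versa) measures |min a n - min b n|
theorem pv_count_levels (n : Nat) (a b : Int) (ha : 0 ≤ a) (hb : 0 ≤ b) :
    ((List.range n).map (fun (t : Nat) =>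
      if (decide ((t:Int) < a) != decide ((t:Int) < b)) then (1:Int) else 0)).sum
    = |min a n - min b n| := by
  induction n with
  | zero =>
      simp only [List.range_zero, List.map_nil, List.sum_nil, Nat.cast_zero]
      rw [min_eq_right ha, min_eq_right hb]
      simp
  | succ n ih =>
      rw [List.range_succ, List.map_append, List.sum_append]
      rw [ih]
      simp only [List.map_cons, List.map_nil, List.sum_cons, List.sum_nil, add_zero]
      push_cast
      by_cases h1 : (n:Int) < a
      · by_cases h2 : (n:Int) < b
        · have hs : (if (decide ((n:Int) < a) != decide ((n:Int) < b)) then (1:Int) else 0)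
              = 0 := by simp [h1, h2]
          rw [hs, min_eq_right (show ((n:Int)) ≤ a by omega),
            min_eq_right (show ((n:Int)) ≤ b by omega),
            min_eq_right (show ((n:Int)+1) ≤ a by omega),
            min_eq_right (show ((n:Int)+1) ≤ b by omega)]
          simp
        · have hs : (if (decide ((n:Int) < a) != decide ((n:Int) < b)) then (1:Int) else 0)
              = 1 := by simp [h1, h2]
          rw [hs, min_eq_right (show ((n:Int)) ≤ a by omega),
            min_eq_left (show b ≤ ((n:Int)) by omega),
            min_eq_right (show ((n:Int)+1) ≤ a by omega),
            min_eq_left (show b ≤ ((n:Int)+1) by omega)]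
          rw [abs_of_nonneg (by omega), abs_of_nonneg (by omega)]
          omega
      · by_cases h2 : (n:Int) < b
        · have hs : (if (decide ((n:Int) < a) != decide ((n:Int) < b)) then (1:Int) else 0)
              = 1 := by simp [h1, h2]
          rw [hs, min_eq_left (show a ≤ ((n:Int)) by omega),
            min_eq_right (show ((n:Int)) ≤ b by omega),
            min_eq_left (show a ≤ ((n:Int)+1) by omega),
            min_eq_right (show ((n:Int)+1) ≤ b by omega)]
          rw [abs_of_nonpos (by omega), abs_of_nonpos (by omega)]
          omega
        · have hs : (if (decide ((n:Int) < a) != decide ((n:Int) < b)) then (1:Int) else 0)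
              = 0 := by simp [h1, h2]
          rw [hs, min_eq_left (show a ≤ ((n:Int)) by omega),
            min_eq_left (show b ≤ ((n:Int)) by omega),
            min_eq_left (show a ≤ ((n:Int)+1) by omega),
            min_eq_left (show b ≤ ((n:Int)+1) by omega)]
          simp

-- per adjacent pair: the boundary contributions over all levels sum to |Δheight|
theorem pv_pair_levels (tb : List (List Int)) (x : Nat) :
    ((List.range tb.length).map (fun i =>
        if ((List.range (i+1)).any (pvQ tb x)) != ((List.range (i+1)).any (pvQ tb (x+1)))
        then (1:Int) else 0)).sum
      = |pvH tb x - pvH tb (x+1)| := by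
  obtain ⟨ha0, han⟩ := pvH_bounds tb x
  obtain ⟨hb0, hbn⟩ := pvH_bounds tb (x+1)
  have hstep : ∀ i ∈ List.range tb.length,
      (if ((List.range (i+1)).any (pvQ tb x)) != ((List.range (i+1)).any (pvQ tb (x+1)))
        then (1:Int) else 0)
      = (fun (i : Nat) =>
          if (decide (((tb.length - 1 - i : Nat) : Int) < pvH tb x)
            != decide (((tb.length - 1 - i : Nat) : Int) < pvH tb (x+1)))
          then (1:Int) else 0) i := by
    intro i hi
    have hi' := List.mem_range.mp hi
    rw [pv_any_iff tb x (i+1) (by omega), pv_any_iff tb (x+1) (i+1) (by omega)]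
    have e : (tb.length : Int) - ((i+1 : Nat) : Int) = (((tb.length - 1 - i : Nat)) : Int) := by
      omega
    rw [e]
  rw [List.map_congr_left hstep]
  have hfinal : ((List.range tb.length).map (fun (t : Nat) =>
      if (decide ((t:Int) < pvH tb x) != decide ((t:Int) < pvH tb (x+1)))
      then (1:Int) else 0)).sum = |pvH tb x - pvH tb (x+1)| := by
    rw [pv_count_levels tb.length _ _ ha0 hb0, min_eq_left han, min_eq_left hbn]
  exact (pv_sum_rev tb.length (fun (t : Nat) =>
      if (decide ((t:Int) < pvH tb x) != decide ((t:Int) < pvH tb (x+1)))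
      then (1:Int) else 0)).symm.trans hfinal

-- getD of the height table
theorem pvHeights_getD (tb : List (List Int)) (x : Nat) (hx : x < (tb.headD []).length) :
    (((List.range ((tb.headD []).length)).map (pvH tb)).getD x 0) = pvH tb x := by
  rw [List.getD_eq_getElem?_getD, List.getElem?_map]
  rw [List.getElem?_range hx]
  rfl

-- ===== VERDICT (by name: the statement is the Claim_ definition above) =====
theorem get_bumpiness_spec : Claim_equal_get_bumpiness := by
  intro tb _ _
  unfold Spec_get_bumpiness
  rw [pvA_eq_pairSum, pvPairSum_eq_sum, pvB_eq_levels]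
  have hcount : ∀ i ∈ List.range tb.length,
      pvB_count ((tb.headD []).length) (pvMaskF tb (i+1))
        = ((List.range ((tb.headD []).length - 1)).map (fun x =>
            if ((List.range (i+1)).any (pvQ tb x)) != ((List.range (i+1)).any (pvQ tb (x+1)))
            then (1:Int) else 0)).sum := fun i _ => pvB_count_mask tb (i+1)
  rw [List.map_congr_left hcount]
  rw [pv_sum_swap (List.range tb.length) (List.range ((tb.headD []).length - 1))]
  simp only [List.length_map, List.length_range]
  refine congrArg List.sum (List.map_congr_left ?_)
  intro x hx
  have hx' := List.mem_range.mp hx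
  rw [pvHeights_getD tb x (by omega), pvHeights_getD tb (x+1) (by omega)]
  exact (pv_pair_levels tb x).symm
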